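-- pv_equiv track=rewrite | github.com/GustavoMarinho82/uerj | Fundamentos_da_Computacao/Exercicios/06-06/Ex05.py | dicionario_prefixos
-- ===== SOURCE A (Python) =====
-- def dicionario_prefixos(palavras, tamanho_prefixo):
--     dic_prefixos = {}
--     prefixos = [palavra[0:tamanho_prefixo] for palavra in palavras]
--
--     """ OU
--     prefixos = []
--     for palavra in palavras:
--         prefixos.append(palavra[0:tamanho_prefixo])
--     """
--
--     # sets não aceitam valores repetidos, eliminando esses valores
--     for prefixo in set(prefixos):
--         dic_prefixos[prefixo] = prefixos.count(prefixo)
--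
--     return dic_prefixos
--
-- palavras = ["abacate", "abacaxi", "cenoura", "senhor", "abelha", "centavo"]
-- ===== SOURCE B (Python) =====
-- # B: one pass building a counting dict (no distinct-set pass, no repeated list.count rescans).
-- def dicionario_prefixos(palavras, tamanho_prefixo):
--     contagem = {}
--     for palavra in palavras:
--         prefixo = palavra[0:tamanho_prefixo]
--         contagem[prefixo] = contagem.get(prefixo, 0) + 1
--     return contagem
-- ===== Notes on version B (the rewrite author's own statement) =====
-- stated objective: faster
-- what changed: Replaces A's build-prefix-list / distinct-set / per-key list.count rescans with a single pass that increments a counting dict as each prefix is produced.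
import Mathlib
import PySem

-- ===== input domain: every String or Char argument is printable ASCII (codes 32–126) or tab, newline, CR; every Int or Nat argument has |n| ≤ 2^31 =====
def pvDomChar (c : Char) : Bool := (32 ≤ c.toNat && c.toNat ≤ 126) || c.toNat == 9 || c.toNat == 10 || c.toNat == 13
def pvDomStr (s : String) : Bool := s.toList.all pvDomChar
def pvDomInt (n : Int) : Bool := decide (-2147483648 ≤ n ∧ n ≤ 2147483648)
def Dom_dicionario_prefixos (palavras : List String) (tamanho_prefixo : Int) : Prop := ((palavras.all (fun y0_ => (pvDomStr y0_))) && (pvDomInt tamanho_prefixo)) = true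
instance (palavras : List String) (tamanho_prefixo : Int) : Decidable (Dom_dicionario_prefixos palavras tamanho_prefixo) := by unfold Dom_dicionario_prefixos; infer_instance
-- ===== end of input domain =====

-- B replaces A's distinct-set pass with repeated list.count rescans by one counting-dict pass (return value equivalence; A's Python dict key order follows set hash order, modelled here as first-insertion order).
-- ===== PORT A =====
def dicionario_prefixos (palavras : List String) (tamanho_prefixo : Int) : List (String × Int) :=
  let prefixos : List String := palavras.map (fun palavra => PySem.Str.slice palavra (some 0) (some tamanho_prefixo))
  let dic_prefixos : PySem.Dict String Int :=
    (PySem.Set.ofList prefixos).foldl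
      (fun d prefixo => d.insert prefixo ((PySem.List.count prefixos prefixo : Nat) : Int))
      PySem.Dict.empty
  dic_prefixos.items

-- ===== PORT B =====
def dicionario_prefixos_alt (palavras : List String) (tamanho_prefixo : Int) : List (String × Int) :=
  let contagem : PySem.Dict String Int :=
    palavras.foldl
      (fun d palavra =>
        let prefixo := PySem.Str.slice palavra (some 0) (some tamanho_prefixo)
        d.insert prefixo (d.getD prefixo 0 + 1))
      PySem.Dict.empty
  contagem.items

-- ===== PRECONDITION & SPEC =====
def Spec_dicionario_prefixos (palavras : List String) (tamanho_prefixo : Int) (out : List (String × Int)) : Prop := out = dicionario_prefixos_alt palavras tamanho_prefixo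
instance (palavras : List String) (tamanho_prefixo : Int) (out : List (String × Int)) : Decidable (Spec_dicionario_prefixos palavras tamanho_prefixo out) := by unfold Spec_dicionario_prefixos; infer_instance

-- ===== CLAIM (what is proved, stated in full; the proofs are below) =====
def Claim_equal_dicionario_prefixos : Prop := ∀ (palavras : List String) (tamanho_prefixo : Int), Dom_dicionario_prefixos palavras tamanho_prefixo → Spec_dicionario_prefixos palavras tamanho_prefixo (dicionario_prefixos palavras tamanho_prefixo)

-- ===== LEMMAS AND PROOFS =====

-- ===== VERDICT (by name: the statement is the Claim_ definition above) =====
theorem dicionario_prefixos_spec : Claim_equal_dicionario_prefixos := by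
  intro palavras tamanho_prefixo _
  unfold Spec_dicionario_prefixos dicionario_prefixos dicionario_prefixos_alt
  rw [← List.foldl_map (f := fun palavra => PySem.Str.slice palavra (some 0) (some tamanho_prefixo))
        (g := fun (d : PySem.Dict String Int) prefixo => d.insert prefixo (d.getD prefixo 0 + 1))]
  rw [PySem.Dict.foldl_insert_getD_add_one_eq_counter, PySem.Dict.items_counter]
  rw [PySem.Dict.items_foldl_insert_fresh _ _ _ _ (by intro a _; exact PySem.Dict.contains_empty a)
        (by simpa using PySem.Set.nodup_ofList (palavras.map (fun palavra => PySem.Str.slice palavra (some 0) (some tamanho_prefixo))))]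
  simp [PySem.List.count_eq, PySem.Dict.empty]
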